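-- pv_equiv track=rewrite | github.com/EddieJ03/WhisperMac | helpers.py | _split_long_lines
-- ===== SOURCE A (Python) =====
-- def _split_long_lines(result: list[str], max_length=60):
--     """
--     Splits strings in the list that exceed max_length
--     at the space closest to the middle.
--     """
--     output: list[str] = []
--
--     for line in result:
--         if len(line) <= max_length:
--             output.append(line)
--             continue
--
--         mid = len(line) // 2
--         spaces = [i for i, char in enumerate(line) if char == " "]
--
--         if not spaces:
--             output.append(line)
--             continue
--
--         split_index = min(spaces, key=lambda x: abs(x - mid))
--
--         part1 = line[:split_index].strip()
--         part2 = line[split_index:].strip()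
--         output.extend([part1, part2])
--
--     return output
-- ===== SOURCE B (Python) =====
-- def _split_long_lines(result: list[str], max_length=60):
--     """Same task, but finds the space nearest the middle by probing
--     outward from the center (left first at each distance), instead of
--     building the full list of space positions and taking min(key=...)."""
--     output: list[str] = []
--     for line in result:
--         if len(line) <= max_length:
--             output.append(line)
--             continue
--         n = len(line)
--         mid = n // 2
--         split_index = None
--         for d in range(n + 1):
--             i = mid - d
--             if 0 <= i < n and line[i] == " ":
--                 split_index = i
--                 break
--             j = mid + d
--             if j < n and line[j] == " ":
--                 split_index = j
--                 break
--         if split_index is None: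
--             output.append(line)
--             continue
--         output.append(line[:split_index].strip())
--         output.append(line[split_index:].strip())
--     return output
-- ===== Notes on version B (the rewrite author's own statement) =====
-- stated objective: alternative
-- what changed: For each over-long line, instead of materializing the list of all space positions and taking min(key=|x-mid|), B probes outward from the middle (mid-d before mid+d for d=0,1,...) and stops at the first space, which is exactly the leftmost-on-ties nearest space.
import Mathlib
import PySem

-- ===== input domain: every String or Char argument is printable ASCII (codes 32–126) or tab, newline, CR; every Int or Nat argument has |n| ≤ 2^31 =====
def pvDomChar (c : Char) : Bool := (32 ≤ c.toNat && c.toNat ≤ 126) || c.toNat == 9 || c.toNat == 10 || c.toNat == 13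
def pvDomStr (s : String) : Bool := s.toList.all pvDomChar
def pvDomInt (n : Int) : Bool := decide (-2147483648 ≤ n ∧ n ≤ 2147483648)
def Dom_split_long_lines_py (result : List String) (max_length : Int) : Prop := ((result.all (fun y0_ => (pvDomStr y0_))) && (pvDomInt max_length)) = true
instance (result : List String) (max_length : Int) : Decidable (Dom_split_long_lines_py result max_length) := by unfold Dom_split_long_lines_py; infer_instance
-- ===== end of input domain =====

set_option maxHeartbeats 1600000

-- B replaces A's full list of space positions + min(key=|x-mid|) by an early-exit
-- center-outward probe (left before right at each distance); same return value.

-- ===== PORT A =====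
def split_long_lines_py (result : List String) (max_length : Int) : List String :=
  result.foldl (fun output line =>
    if PySem.Str.len line ≤ max_length then output ++ [line]
    else
      let mid := PySem.Int.floordiv (PySem.Str.len line) 2
      let spaces := ((PySem.List.enumerate line.toList).filter (fun p => p.2 == ' ')).map (fun p => p.1)
      if spaces = [] then output ++ [line]
      else
        match PySem.List.min? spaces (fun x => |x - mid|) with
        | none => output ++ [line]  -- unreachable: spaces ≠ []
        | some si =>
          output ++ [PySem.Str.strip (PySem.Str.slice line none (some si)),
                     PySem.Str.strip (PySem.Str.slice line (some si) none)]) []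

-- ===== PORT B =====
-- the inner 'for d in range(n+1)' loop of Source B: probe mid-d (if 0 ≤ mid-d, in range, a space),
-- then mid+d, else continue; cs[i]? = some ' ' is Python's 'i < n and line[i] == " "'
def probeCenter (cs : List Char) (mid : Nat) : List Nat → Option Nat
  | [] => none
  | d :: ds =>
    if d ≤ mid ∧ cs[mid - d]? = some ' ' then some (mid - d)
    else if cs[mid + d]? = some ' ' then some (mid + d)
    else probeCenter cs mid ds

def split_long_lines_py_alt (result : List String) (max_length : Int) : List String :=
  result.foldl (fun output line =>
    if ((line.toList.length : Int)) ≤ max_length then output ++ [line]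
    else
      let cs := line.toList
      let mid := cs.length / 2
      match probeCenter cs mid (List.range (cs.length + 1)) with
      | none => output ++ [line]
      | some j =>
          output ++ [String.ofList (PySem.Chars.strip (cs.take j)),
                     String.ofList (PySem.Chars.strip (cs.drop j))]) []

-- ===== PRECONDITION & SPEC =====
def Spec_split_long_lines_py (result : List String) (max_length : Int) (out : List String) : Prop := out = split_long_lines_py_alt result max_length
instance (result : List String) (max_length : Int) (out : List String) : Decidable (Spec_split_long_lines_py result max_length out) := by unfold Spec_split_long_lines_py; infer_instance

-- ===== CLAIM (what is proved, stated in full; the proofs are below) =====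
def Claim_equal_split_long_lines_py : Prop := ∀ (result : List String) (max_length : Int), Dom_split_long_lines_py result max_length → Spec_split_long_lines_py result max_length (split_long_lines_py result max_length)

-- ===== LEMMAS AND PROOFS =====

-- Nat distance to mid (truncated-subtraction form, omega-friendly)
def distN (mid i : Nat) : Nat := (mid - i) + (i - mid)

-- "j is the space index min(key=|·-mid|) would pick": a space, at minimal distance, leftmost on ties
def GoodN (cs : List Char) (mid j : Nat) : Prop :=
  cs[j]? = some ' ' ∧ ∀ i : Nat, cs[i]? = some ' ' →
    (distN mid j ≤ distN mid i ∧ (distN mid i = distN mid j → j ≤ i))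

theorem goodN_unique {cs : List Char} {mid j1 j2 : Nat}
    (h1 : GoodN cs mid j1) (h2 : GoodN cs mid j2) : j1 = j2 := by
  obtain ⟨s1, m1⟩ := h1
  obtain ⟨s2, m2⟩ := h2
  obtain ⟨le12, tie12⟩ := m1 j2 s2
  obtain ⟨le21, tie21⟩ := m2 j1 s1
  omega

theorem abs_cast_dist (mid i : Nat) : |(i : Int) - (mid : Int)| = ((distN mid i : Nat) : Int) := by
  rcases abs_cases ((i : Int) - (mid : Int)) with ⟨h1, h2⟩ | ⟨h1, h2⟩ <;>
    · rw [h1]; unfold distN; omega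

theorem probe_sound (cs : List Char) (mid : Nat) :
    ∀ (ds : List Nat) (j : Nat), probeCenter cs mid ds = some j → cs[j]? = some ' ' := by
  intro ds
  induction ds with
  | nil => intro j h; simp [probeCenter] at h
  | cons d ds ih =>
    intro j h
    unfold probeCenter at h
    split at h
    · rename_i hg; cases h; exact hg.2
    · split at h
      · rename_i hg; cases h; exact hg
      · exact ih j h

theorem probe_none (cs : List Char) (mid : Nat) :
    ∀ (ds : List Nat), probeCenter cs mid ds = none → ∀ d ∈ ds,
      ¬(d ≤ mid ∧ cs[mid - d]? = some ' ') ∧ cs[mid + d]? ≠ some ' ' := by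
  intro ds
  induction ds with
  | nil => intro _ d hd; simp at hd
  | cons d0 ds ih =>
    intro h d hd
    unfold probeCenter at h
    split at h
    · simp at h
    · split at h
      · simp at h
      · rcases List.mem_cons.mp hd with rfl | hd'
        · rename_i hL hR; exact ⟨hL, hR⟩
        · exact ih h d hd'

theorem probe_some_range' (cs : List Char) (mid : Nat) :
    ∀ (cnt s j : Nat), probeCenter cs mid (List.range' s cnt) = some j →
      ∃ d, s ≤ d ∧ d < s + cnt ∧
        ((d ≤ mid ∧ cs[mid - d]? = some ' ' ∧ j = mid - d) ∨
         (¬(d ≤ mid ∧ cs[mid - d]? = some ' ') ∧ cs[mid + d]? = some ' ' ∧ j = mid + d)) ∧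
        ∀ e, s ≤ e → e < d → ¬(e ≤ mid ∧ cs[mid - e]? = some ' ') ∧ cs[mid + e]? ≠ some ' ' := by
  intro cnt
  induction cnt with
  | zero => intro s j h; simp [List.range', probeCenter] at h
  | succ c ih =>
    intro s j h
    rw [List.range'_succ] at h
    unfold probeCenter at h
    split at h
    · rename_i hg; cases h
      exact ⟨s, le_refl s, by omega, Or.inl ⟨hg.1, hg.2, rfl⟩, fun e he1 he2 => by omega⟩
    · split at h
      · rename_i hL hR; cases h
        exact ⟨s, le_refl s, by omega, Or.inr ⟨hL, hR, rfl⟩, fun e he1 he2 => by omega⟩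
      · rename_i hL hR
        obtain ⟨d, hd1, hd2, hhit, hno⟩ := ih (s + 1) j h
        refine ⟨d, by omega, by omega, hhit, ?_⟩
        intro e he1 he2
        rcases Nat.eq_or_lt_of_le he1 with rfl | hlt
        · exact ⟨hL, hR⟩
        · exact hno e hlt he2

theorem probe_good (cs : List Char) (mid j : Nat) (hmid : mid ≤ cs.length)
    (h : probeCenter cs mid (List.range (cs.length + 1)) = some j) : GoodN cs mid j := by
  rw [List.range_eq_range'] at h
  obtain ⟨d, _, hdlt, hhit, hno⟩ := probe_some_range' cs mid (cs.length + 1) 0 j h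
  have hspace : cs[j]? = some ' ' := by
    rcases hhit with ⟨_, hs, rfl⟩ | ⟨_, hs, rfl⟩ <;> exact hs
  have hdj : distN mid j = d := by
    rcases hhit with ⟨h1, _, rfl⟩ | ⟨h1, _, rfl⟩ <;> unfold distN <;> omega
  refine ⟨hspace, ?_⟩
  intro i hi
  obtain ⟨hin, hci⟩ := List.getElem?_eq_some_iff.mp hi
  have hge : d ≤ distN mid i := by
    by_contra hc
    push_neg at hc
    obtain ⟨hnL, hnR⟩ := hno (distN mid i) (Nat.zero_le _) hc
    by_cases him : i ≤ mid
    · apply hnL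
      refine ⟨by unfold distN; omega, ?_⟩
      have hmi : mid - distN mid i = i := by unfold distN; omega
      rw [hmi]; exact hi
    · apply hnR
      have hmi : mid + distN mid i = i := by unfold distN; omega
      rw [hmi]; exact hi
  refine ⟨by omega, ?_⟩
  intro htie
  unfold distN at htie hdj hge
  rcases hhit with ⟨h1, _, rfl⟩ | ⟨h1, hs, rfl⟩
  · -- left hit: j = mid - d is the smaller of the two candidates at distance d
    omega
  · -- right hit: the left candidate at distance d is not a space, so i = mid + d
    by_cases him : i ≤ mid
    · exfalso
      apply h1
      refine ⟨by omega, ?_⟩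
      have hmi : mid - d = i := by omega
      rw [hmi]; exact hi
    · omega

theorem probe_isSome_of_space (cs : List Char) (mid : Nat) (hmid : mid ≤ cs.length)
    (i : Nat) (hi : cs[i]? = some ' ') :
    probeCenter cs mid (List.range (cs.length + 1)) ≠ none := by
  intro hnone
  obtain ⟨hin, hci⟩ := List.getElem?_eq_some_iff.mp hi
  have hd : distN mid i ∈ List.range (cs.length + 1) := by
    rw [List.mem_range]; unfold distN; omega
  obtain ⟨hnL, hnR⟩ := probe_none cs mid _ hnone (distN mid i) hd
  by_cases him : i ≤ mid
  · apply hnL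
    refine ⟨by unfold distN; omega, ?_⟩
    have hmi : mid - distN mid i = i := by unfold distN; omega
    rw [hmi]; exact hi
  · apply hnR
    have hmi : mid + distN mid i = i := by unfold distN; omega
    rw [hmi]; exact hi

-- min? (x :: t) key is the first-minimum fold
theorem min?_cons {α κ : Type} [LinearOrder κ] (key : α → κ) :
    ∀ (t : List α) (x : α),
      PySem.List.min? (x :: t) key = some (t.foldl (fun m y => if key y < key m then y else m) x) := by
  intro t
  induction t with
  | nil => intro x; rfl
  | cons y t ih =>
    intro x
    have h1 : PySem.List.min? (x :: y :: t) key =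
        PySem.List.min? ((if key y < key x then y else x) :: t) key := by
      unfold PySem.List.min?
      simp only [List.foldl_cons]
      split <;> rfl
    rw [h1, ih]
    simp only [List.foldl_cons]

-- the first-minimum fold over a strictly increasing Int list: minimal key, leftmost on ties
theorem foldl_min_good (key : Int → Int) :
    ∀ (t : List Int) (x : Int), (∀ y ∈ t, x < y) → t.Pairwise (· < ·) →
      (t.foldl (fun m y => if key y < key m then y else m) x) ∈ x :: t ∧
      (∀ y ∈ x :: t, key (t.foldl (fun m y => if key y < key m then y else m) x) ≤ key y) ∧
      (∀ y ∈ x :: t, key y = key (t.foldl (fun m y => if key y < key m then y else m) x) →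
        (t.foldl (fun m y => if key y < key m then y else m) x) ≤ y) := by
  intro t
  induction t with
  | nil =>
    intro x _ _
    exact ⟨List.mem_singleton.mpr rfl, by simp, by simp⟩
  | cons y t ih =>
    intro x hx hp
    have hyt : ∀ z ∈ t, y < z := fun z hz => (List.pairwise_cons.mp hp).1 z hz
    have hpt : t.Pairwise (· < ·) := (List.pairwise_cons.mp hp).2
    have hxy : x < y := hx y (List.mem_cons_self)
    simp only [List.foldl_cons]
    by_cases h : key y < key x
    · rw [if_pos h]
      obtain ⟨hmem, hmin, htie⟩ := ih y hyt hpt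
      refine ⟨List.mem_cons_of_mem _ hmem, ?_, ?_⟩
      · intro z hz
        rcases List.mem_cons.mp hz with rfl | hz'
        · have := hmin y List.mem_cons_self
          omega
        · exact hmin z hz'
      · intro z hz hkz
        rcases List.mem_cons.mp hz with rfl | hz'
        · exfalso
          have := hmin y List.mem_cons_self
          omega
        · exact htie z hz' hkz
    · rw [if_neg h]
      push_neg at h
      have hxt : ∀ z ∈ t, x < z := fun z hz => lt_trans hxy (hyt z hz)
      obtain ⟨hmem, hmin, htie⟩ := ih x hxt hpt
      have hmem' : (t.foldl (fun m y => if key y < key m then y else m) x) ∈ x :: y :: t := by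
        rcases List.mem_cons.mp hmem with h' | h'
        · rw [h']; exact List.mem_cons_self
        · exact List.mem_cons_of_mem _ (List.mem_cons_of_mem _ h')
      refine ⟨hmem', ?_, ?_⟩
      · intro z hz
        rcases List.mem_cons.mp hz with rfl | hz'
        · exact hmin z List.mem_cons_self
        · rcases List.mem_cons.mp hz' with rfl | hz''
          · have := hmin x List.mem_cons_self
            omega
          · exact hmin _ (List.mem_cons_of_mem _ hz'')
      · intro z hz hkz
        rcases List.mem_cons.mp hz with rfl | hz'
        · exact htie z List.mem_cons_self hkz
        · rcases List.mem_cons.mp hz' with rfl | hz''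
          · -- tie with y: squeeze key x = key result, so result = x < y
            have hminx := hmin x List.mem_cons_self
            have hkx : key x = key (t.foldl (fun m y => if key y < key m then y else m) x) := by omega
            have hrx := htie x List.mem_cons_self hkx
            have heq : (t.foldl (fun m y => if key y < key m then y else m) x) = x := by
              rcases List.mem_cons.mp hmem with h' | h'
              · exact h'
              · exact absurd (hxt _ h') (by omega)
            omega
          · exact htie _ (List.mem_cons_of_mem _ hz'') hkz

-- membership in A's 'spaces' list
theorem mem_spaces (cs : List Char) (x : Int) :
    x ∈ (((PySem.List.enumerate cs).filter (fun p => p.2 == ' ')).map (fun p => p.1)) ↔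
      ∃ k : Nat, ∃ _ : k < cs.length, cs[k] = ' ' ∧ x = (k : Int) := by
  simp only [List.mem_map, List.mem_filter, PySem.List.mem_enumerate_iff]
  constructor
  · rintro ⟨⟨a, b⟩, ⟨⟨k, hk, hp⟩, hb⟩, hx⟩
    cases hp
    simp only [beq_iff_eq] at hb
    exact ⟨k, hk, hb, by simpa using hx.symm⟩
  · rintro ⟨k, hk, hc, rfl⟩
    exact ⟨((k : Int), cs[k]), ⟨⟨k, hk, by simp⟩, by simp [hc]⟩, rfl⟩

theorem spaces_pairwise (cs : List Char) :
    (((PySem.List.enumerate cs).filter (fun p => p.2 == ' ')).map (fun p => p.1)).Pairwise (· < ·) := by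
  apply List.pairwise_map.mpr
  exact ((PySem.List.pairwise_lt_enumerate cs 0).filter _)

-- A's min? over spaces picks the GoodN index
theorem min?_good (cs : List Char) (mid : Nat) (m : Int)
    (h : PySem.List.min? (((PySem.List.enumerate cs).filter (fun p => p.2 == ' ')).map (fun p => p.1))
          (fun x => |x - (mid : Int)|) = some m) :
    ∃ jm : Nat, m = (jm : Int) ∧ GoodN cs mid jm := by
  set spaces := (((PySem.List.enumerate cs).filter (fun p => p.2 == ' ')).map (fun p => p.1)) with hsp
  cases hs : spaces with
  | nil => rw [hs] at h; simp [PySem.List.min?] at h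
  | cons x t =>
    rw [hs, min?_cons] at h
    have hxp : (x :: t).Pairwise (· < ·) := by rw [← hs]; exact spaces_pairwise cs
    obtain ⟨hmem, hmin, htie⟩ := foldl_min_good (fun x => |x - (mid : Int)|) t x
      (fun y hy => (List.pairwise_cons.mp hxp).1 y hy) (List.pairwise_cons.mp hxp).2
    cases h
    set r := t.foldl (fun m y => if |y - (mid:Int)| < |m - (mid:Int)| then y else m) x with hr
    have hrmem : r ∈ spaces := by rw [hs]; exact hmem
    obtain ⟨jm, hjm, hcjm, hrjm⟩ := (mem_spaces cs r).mp hrmem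
    refine ⟨jm, hrjm, ?_, ?_⟩
    · rw [List.getElem?_eq_getElem hjm, hcjm]
    · intro i hi
      obtain ⟨hin, hci⟩ := List.getElem?_eq_some_iff.mp hi
      have himem : ((i : Nat) : Int) ∈ x :: t := by
        rw [← hs]; exact (mem_spaces cs i).mpr ⟨i, hin, hci, rfl⟩
      have h1 := hmin _ himem
      have h2 := htie _ himem
      rw [hrjm] at h1 h2
      rw [abs_cast_dist mid i, abs_cast_dist mid jm] at h1
      rw [abs_cast_dist mid i, abs_cast_dist mid jm] at h2
      constructor
      · exact_mod_cast h1
      · intro he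
        have h3 := h2 (by exact_mod_cast congrArg (fun n : Nat => (n : Int)) he)
        exact_mod_cast h3

-- the per-line step functions of the two folds agree
theorem step_eq (output : List String) (line : String) (max_length : Int) :
    (if PySem.Str.len line ≤ max_length then output ++ [line]
     else
      let mid := PySem.Int.floordiv (PySem.Str.len line) 2
      let spaces := ((PySem.List.enumerate line.toList).filter (fun p => p.2 == ' ')).map (fun p => p.1)
      if spaces = [] then output ++ [line]
      else
        match PySem.List.min? spaces (fun x => |x - mid|) with
        | none => output ++ [line]
        | some si =>
          output ++ [PySem.Str.strip (PySem.Str.slice line none (some si)),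
                     PySem.Str.strip (PySem.Str.slice line (some si) none)]) =
    (if ((line.toList.length : Int)) ≤ max_length then output ++ [line]
     else
      let cs := line.toList
      let mid := cs.length / 2
      match probeCenter cs mid (List.range (cs.length + 1)) with
      | none => output ++ [line]
      | some j =>
          output ++ [String.ofList (PySem.Chars.strip (cs.take j)),
                     String.ofList (PySem.Chars.strip (cs.drop j))]) := by
  have hlen : PySem.Str.len line = (line.toList.length : Int) := rfl
  rw [hlen]
  by_cases hle : (line.toList.length : Int) ≤ max_length
  · rw [if_pos hle, if_pos hle]
  · rw [if_neg hle, if_neg hle]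
    simp only []
    have hmidI : PySem.Int.floordiv ((line.toList.length : Nat) : Int) 2 =
        ((line.toList.length / 2 : Nat) : Int) := by
      simp [PySem.Int.floordiv, Int.fdiv_eq_ediv]
    rw [hmidI]
    have hmidle : line.toList.length / 2 ≤ line.toList.length := by omega
    by_cases hspn : ((PySem.List.enumerate line.toList).filter (fun p => p.2 == ' ')).map (fun p => p.1) = []
    · rw [if_pos hspn]
      have hprobe : probeCenter line.toList (line.toList.length / 2) (List.range (line.toList.length + 1)) = none := by
        cases hp : probeCenter line.toList (line.toList.length / 2) (List.range (line.toList.length + 1)) with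
        | none => rfl
        | some j =>
          exfalso
          have hj := probe_sound line.toList _ _ j hp
          obtain ⟨hjn, hcj⟩ := List.getElem?_eq_some_iff.mp hj
          have hmem : ((j : Nat) : Int) ∈ ((PySem.List.enumerate line.toList).filter (fun p => p.2 == ' ')).map (fun p => p.1) :=
            (mem_spaces line.toList j).mpr ⟨j, hjn, hcj, rfl⟩
          rw [hspn] at hmem
          simp at hmem
      rw [hprobe]
    · rw [if_neg hspn]
      obtain ⟨x, hx⟩ := List.exists_mem_of_ne_nil _ hspn
      obtain ⟨i0, hi0, hci0, _⟩ := (mem_spaces line.toList x).mp hx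
      have hi0' : line.toList[i0]? = some ' ' := by rw [List.getElem?_eq_getElem hi0, hci0]
      cases hp : probeCenter line.toList (line.toList.length / 2) (List.range (line.toList.length + 1)) with
      | none => exact absurd hp (probe_isSome_of_space line.toList _ hmidle i0 hi0')
      | some j =>
        have hgoodj := probe_good line.toList _ j hmidle hp
        cases hm : PySem.List.min? (((PySem.List.enumerate line.toList).filter (fun p => p.2 == ' ')).map (fun p => p.1))
            (fun x => |x - ((line.toList.length / 2 : Nat) : Int)|) with
        | none =>
          exfalso
          cases hsc : ((PySem.List.enumerate line.toList).filter (fun p => p.2 == ' ')).map (fun p => p.1) with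
          | nil => exact hspn hsc
          | cons a t => rw [hsc, min?_cons] at hm; simp at hm
        | some m =>
          obtain ⟨jm, rfl, hgoodm⟩ := min?_good line.toList _ m hm
          have hjj : jm = j := goodN_unique hgoodm hgoodj
          subst hjj
          have hpart1 : PySem.Str.strip (PySem.Str.slice line none (some (jm : Int))) =
              String.ofList (PySem.Chars.strip (line.toList.take jm)) := by
            rw [← String.ofList_toList (s := PySem.Str.strip (PySem.Str.slice line none (some (jm : Int))))]
            rw [PySem.Str.toList_strip, PySem.Str.toList_slice,
              PySem.Chars.slice_eq_listSlice, PySem.List.slice_to_natCast]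
          have hpart2 : PySem.Str.strip (PySem.Str.slice line (some (jm : Int)) none) =
              String.ofList (PySem.Chars.strip (line.toList.drop jm)) := by
            rw [← String.ofList_toList (s := PySem.Str.strip (PySem.Str.slice line (some (jm : Int)) none))]
            rw [PySem.Str.toList_strip, PySem.Str.toList_slice,
              PySem.Chars.slice_eq_listSlice, PySem.List.slice_from_natCast]
          simp [hpart1, hpart2]

-- ===== VERDICT (by name: the statement is the Claim_ definition above) =====
theorem split_long_lines_py_spec : Claim_equal_split_long_lines_py := by
  intro result max_length _hdom
  unfold Spec_split_long_lines_py split_long_lines_py split_long_lines_py_alt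
  congr 1
  funext output line
  exact step_eq output line max_length
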